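-- pv_equiv track=rewrite | github.com/daolvera/Dao.AI.BreakPoint | Dao.AI.BreakPoint.CustomModel.Training/swing_detector.py | _find_continuous_segments
-- ===== SOURCE A (Python) =====
-- def _find_continuous_segments(boolean_array):
--     segments = []
--     start = None
--
--     for i, val in enumerate(boolean_array):
--         if val and start is None:
--             start = i
--         elif not val and start is not None:
--             segments.append((start, i))
--             start = None
--
--     if start is not None:
--         segments.append((start, len(boolean_array)))
--
--     return segments
-- ===== SOURCE B (Python) =====
-- from itertools import groupby
--
--
-- def _find_continuous_segments(boolean_array):
--     segments = []
--     idx = 0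
--     for key, group in groupby(boolean_array, key=bool):
--         length = sum(1 for _ in group)
--         if key:
--             segments.append((idx, idx + length))
--         idx += length
--     return segments
-- ===== Notes on version B (the rewrite author's own statement) =====
-- stated objective: idiomatic
-- what changed: Replaces the start-sentinel state machine with trailing flush by a single itertools.groupby run-length pass that appends (idx, idx+length) for each True run.
import Mathlib
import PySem

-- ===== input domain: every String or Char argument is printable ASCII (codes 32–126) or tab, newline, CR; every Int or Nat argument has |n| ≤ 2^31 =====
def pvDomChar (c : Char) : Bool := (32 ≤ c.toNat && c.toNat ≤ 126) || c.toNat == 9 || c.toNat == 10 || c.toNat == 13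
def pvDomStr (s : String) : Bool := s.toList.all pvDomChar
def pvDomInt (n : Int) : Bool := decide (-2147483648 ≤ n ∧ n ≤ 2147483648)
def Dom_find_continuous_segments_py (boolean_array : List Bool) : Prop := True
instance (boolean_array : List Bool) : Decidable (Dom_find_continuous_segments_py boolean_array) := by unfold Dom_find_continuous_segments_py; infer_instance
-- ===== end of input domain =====

-- B replaces A's start-sentinel state machine (with trailing flush) by an idiomatic
-- itertools.groupby run-length pass; same O(n) cost, equivalence proved below.


-- ===== PORT A =====
-- A's loop: state (segments, start, i); at the end, an open segment is flushed with len(boolean_array) = final i.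
def pvGoA : List (Int × Int) → Option Int → Nat → List Bool → List (Int × Int)
  | segs, start, i, [] =>
    match start with
    | some s => segs ++ [(s, (i : Int))]
    | none => segs
  | segs, start, i, val :: rest =>
    if val && start.isNone then
      pvGoA segs (some (i : Int)) (i + 1) rest
    else if !val && start.isSome then
      pvGoA (segs ++ [(start.getD 0, (i : Int))]) none (i + 1) rest
    else
      pvGoA segs start (i + 1) rest

def find_continuous_segments_py (boolean_array : List Bool) : List (Int × Int) :=
  pvGoA [] none 0 boolean_array

-- ===== PORT B =====
-- itertools.groupby(·, key=bool) as (key, run-length) pairs.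
def pvGroupBy : List Bool → List (Bool × Nat)
  | [] => []
  | x :: xs => (x, (xs.takeWhile (· == x)).length + 1) :: pvGroupBy (xs.dropWhile (· == x))
termination_by l => l.length
decreasing_by
  simp only [List.length_cons]
  exact Nat.lt_succ_of_le (List.length_dropWhile_le _ _)

-- B's loop over the runs, carrying idx.
def pvGoB : List (Bool × Nat) → Int → List (Int × Int)
  | [], _ => []
  | (key, length) :: rs, idx =>
    (if key then [(idx, idx + (length : Int))] else []) ++ pvGoB rs (idx + (length : Int))

def find_continuous_segments_py_alt (boolean_array : List Bool) : List (Int × Int) :=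
  pvGoB (pvGroupBy boolean_array) 0

-- ===== PRECONDITION & SPEC =====
def Spec_find_continuous_segments_py (boolean_array : List Bool) (out : List (Int × Int)) : Prop := out = find_continuous_segments_py_alt boolean_array
instance (boolean_array : List Bool) (out : List (Int × Int)) : Decidable (Spec_find_continuous_segments_py boolean_array out) := by unfold Spec_find_continuous_segments_py; infer_instance

-- ===== CLAIM (what is proved, stated in full; the proofs are below) =====
def Claim_equal_find_continuous_segments_py : Prop := ∀ (boolean_array : List Bool), Dom_find_continuous_segments_py boolean_array → Spec_find_continuous_segments_py boolean_array (find_continuous_segments_py boolean_array)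

-- ===== LEMMAS AND PROOFS =====

-- "pvGoB for a run list whose first run is an open True segment started at s."
def pvConsAdj (s i : Int) : List (Bool × Nat) → List (Int × Int)
  | (true, n) :: rest => (s, i + (n : Int)) :: pvGoB rest (i + (n : Int))
  | runs => (s, i) :: pvGoB runs i

theorem pvGroupBy_cons_eq (x : Bool) (xs : List Bool) :
    pvGroupBy (x :: x :: xs) =
      (x, (xs.takeWhile (· == x)).length + 2) :: pvGroupBy (xs.dropWhile (· == x)) := by
  rw [pvGroupBy]
  simp

theorem pvGroupBy_cons_ne (x y : Bool) (xs : List Bool) (h : y ≠ x) :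
    pvGroupBy (x :: y :: xs) = (x, 1) :: pvGroupBy (y :: xs) := by
  rw [pvGroupBy]
  simp [h]

theorem pvGoB_false (xs : List Bool) (i : Int) :
    pvGoB (pvGroupBy (false :: xs)) i = pvGoB (pvGroupBy xs) (i + 1) := by
  match xs with
  | [] => simp [pvGroupBy, pvGoB]
  | false :: t =>
      rw [pvGroupBy_cons_eq]
      rw [pvGroupBy]
      simp only [pvGoB, Bool.false_eq_true, reduceIte]
      push_cast
      ring_nf
  | true :: t =>
      rw [pvGroupBy_cons_ne _ _ _ (by simp)]
      simp [pvGoB]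

theorem pvConsAdj_true (xs : List Bool) (s i : Int) :
    pvConsAdj s i (pvGroupBy (true :: xs)) = pvConsAdj s (i + 1) (pvGroupBy xs) := by
  match xs with
  | [] => simp [pvGroupBy, pvConsAdj]
  | true :: t =>
      rw [pvGroupBy_cons_eq]
      rw [pvGroupBy]
      simp only [pvConsAdj]
      push_cast
      ring_nf
  | false :: t =>
      rw [pvGroupBy_cons_ne _ _ _ (by simp)]
      rw [pvGroupBy]
      simp only [pvConsAdj, pvGoB]
      push_cast
      ring_nf

theorem pvGoB_true (xs : List Bool) (i : Int) :
    pvGoB (pvGroupBy (true :: xs)) i = pvConsAdj i (i + 1) (pvGroupBy xs) := by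
  rw [← pvConsAdj_true]
  match xs with
  | [] => simp [pvGroupBy, pvGoB, pvConsAdj]
  | y :: t =>
      rw [pvGroupBy]
      simp only [pvGoB, pvConsAdj, if_true, List.singleton_append]

theorem pvGoA_eq (xs : List Bool) : ∀ (i : Nat) (segs : List (Int × Int)),
    (pvGoA segs none i xs = segs ++ pvGoB (pvGroupBy xs) (i : Int)) ∧
    (∀ s : Int, pvGoA segs (some s) i xs = segs ++ pvConsAdj s (i : Int) (pvGroupBy xs)) := by
  induction xs with
  | nil =>
      intro i segs
      constructor
      · simp [pvGoA, pvGroupBy, pvGoB]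
      · intro s; simp [pvGoA, pvGroupBy, pvGoB, pvConsAdj]
  | cons v rest ih =>
      intro i segs
      constructor
      · cases v with
        | false =>
            rw [pvGoA]
            simp only [Bool.false_and, Bool.not_false, Option.isNone_none, Option.isSome_none,
              Bool.and_false, Bool.false_eq_true, reduceIte]
            rw [(ih (i + 1) segs).1, pvGoB_false]
            push_cast; ring_nf
        | true =>
            rw [pvGoA]
            simp only [Option.isNone_none, Bool.and_true, reduceIte]
            rw [(ih (i + 1) segs).2 (i : Int), pvGoB_true]
            push_cast; ring_nf
      · intro s
        cases v with
        | true =>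
            rw [pvGoA]
            simp only [Option.isNone_some, Bool.and_false, Bool.not_true, Bool.false_and,
              Option.isSome_some, Bool.false_eq_true, reduceIte]
            rw [(ih (i + 1) segs).2 s, pvConsAdj_true]
            push_cast; ring_nf
        | false =>
            rw [pvGoA]
            simp only [Option.isNone_some, Bool.and_false, Bool.not_false,
              Option.isSome_some, Bool.and_true, Bool.false_eq_true, reduceIte,
              Option.getD_some]
            rw [(ih (i + 1) (segs ++ [(s, (i : Int))])).1]
            have hc : pvConsAdj s (i : Int) (pvGroupBy (false :: rest)) =
                (s, (i : Int)) :: pvGoB (pvGroupBy (false :: rest)) (i : Int) := by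
              rw [pvGroupBy]
              simp [pvConsAdj]
            rw [hc, pvGoB_false]
            push_cast
            simp

-- ===== VERDICT (by name: the statement is the Claim_ definition above) =====
theorem find_continuous_segments_py_spec : Claim_equal_find_continuous_segments_py := by
  intro ba _
  show find_continuous_segments_py ba = find_continuous_segments_py_alt ba
  unfold find_continuous_segments_py find_continuous_segments_py_alt
  simpa using (pvGoA_eq ba 0 []).1
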